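-- pv_equiv track=rewrite | github.com/KimigaiiWuyi/MajsoulUID | MajsoulUID/majs_notify/tenhou_meguru.py | n2p
-- ===== SOURCE A (Python) =====
-- def n2p(number: int):
--     if 47 >= number >= 41:
--         return 'ESWNPFC'[number - 41]
--     elif 39 >= number >= 31:
--         return [f'{i}s' for i in range(1, 10)][number - 31]
--     elif 29 >= number >= 21:
--         return [f'{i}p' for i in range(1, 10)][number - 21]
--     elif 19 >= number >= 11:
--         return [f'{i}m' for i in range(1, 10)][number - 11]
--     elif number == 51:
--         return '5mr'
--     elif number == 52:
--         return '5pr'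
--     elif number == 53:
--         return '5sr'
--     return None
-- ===== SOURCE B (Python) =====
-- def n2p(number: int):
--     if 41 <= number <= 47:
--         return 'ESWNPFC'[number - 41]
--     tens, ones = divmod(number, 10)
--     if tens in (1, 2, 3) and 1 <= ones <= 9:
--         return f'{ones}{"mps"[tens - 1]}'
--     if number in (51, 52, 53):
--         return '5' + 'mps'[number - 51] + 'r'
--     return None
-- ===== Notes on version B (the rewrite author's own statement) =====
-- stated objective: simpler
-- what changed: Replaces A's four hard-coded range branches that build and index list comprehensions with direct divmod arithmetic: rank = number % 10, suit = 'mps'[number // 10 - 1], gated on tens in (1,2,3) and 1 <= ones <= 9; honors and red fives remain explicit.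
import Mathlib
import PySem

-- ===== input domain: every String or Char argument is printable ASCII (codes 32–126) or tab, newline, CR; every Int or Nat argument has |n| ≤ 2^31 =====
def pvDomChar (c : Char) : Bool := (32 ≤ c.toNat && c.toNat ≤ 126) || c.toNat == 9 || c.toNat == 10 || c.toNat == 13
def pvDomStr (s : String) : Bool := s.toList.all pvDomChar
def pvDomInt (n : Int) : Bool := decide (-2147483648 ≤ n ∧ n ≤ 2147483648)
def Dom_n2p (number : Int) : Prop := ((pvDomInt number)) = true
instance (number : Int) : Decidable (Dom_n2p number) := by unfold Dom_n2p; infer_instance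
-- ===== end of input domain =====

-- B replaces A's range-test chain over built comprehension lists by direct divmod
-- arithmetic extracting rank and suit (objective: simpler; same O(1) cost).

-- ===== PORT A =====
def n2p (number : Int) : Option String :=
  if 47 ≥ number ∧ number ≥ 41 then
    (PySem.Str.pyGet? "ESWNPFC" (number - 41)).map (fun c => String.ofList [c])
  else if 39 ≥ number ∧ number ≥ 31 then
    PySem.List.pyGet? ((PySem.List.pyRange 1 10 1).map (fun i => PySem.Int.toStr i ++ "s")) (number - 31)
  else if 29 ≥ number ∧ number ≥ 21 then
    PySem.List.pyGet? ((PySem.List.pyRange 1 10 1).map (fun i => PySem.Int.toStr i ++ "p")) (number - 21)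
  else if 19 ≥ number ∧ number ≥ 11 then
    PySem.List.pyGet? ((PySem.List.pyRange 1 10 1).map (fun i => PySem.Int.toStr i ++ "m")) (number - 11)
  else if number = 51 then some "5mr"
  else if number = 52 then some "5pr"
  else if number = 53 then some "5sr"
  else none

-- ===== PORT B =====
def n2p_alt (number : Int) : Option String :=
  if 41 ≤ number ∧ number ≤ 47 then
    (PySem.Str.pyGet? "ESWNPFC" (number - 41)).map (fun c => String.ofList [c])
  else
    let tens := PySem.Int.floordiv number 10
    let ones := PySem.Int.mod number 10
    if (tens = 1 ∨ tens = 2 ∨ tens = 3) ∧ (1 ≤ ones ∧ ones ≤ 9) then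
      (PySem.Str.pyGet? "mps" (tens - 1)).map (fun c => PySem.Int.toStr ones ++ String.ofList [c])
    else if number = 51 ∨ number = 52 ∨ number = 53 then
      (PySem.Str.pyGet? "mps" (number - 51)).map (fun c => "5" ++ String.ofList [c] ++ "r")
    else none

-- ===== PRECONDITION & SPEC =====
def Spec_n2p (number : Int) (out : Option String) : Prop := out = n2p_alt number
instance (number : Int) (out : Option String) : Decidable (Spec_n2p number out) := by unfold Spec_n2p; infer_instance

-- ===== CLAIM (what is proved, stated in full; the proofs are below) =====
def Claim_equal_n2p : Prop := ∀ (number : Int), Dom_n2p number → Spec_n2p number (n2p number)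

-- ===== LEMMAS AND PROOFS =====
theorem n2p_eq_alt (number : Int) : n2p number = n2p_alt number := by
  by_cases h : 11 ≤ number ∧ number ≤ 53
  · obtain ⟨h1, h2⟩ := h
    interval_cases number <;> decide
  · have ht : PySem.Int.floordiv number 10 = number / 10 :=
      PySem.Int.floordiv_eq_ediv_of_pos (by norm_num)
    have ho : PySem.Int.mod number 10 = number % 10 :=
      PySem.Int.mod_eq_emod_of_pos (by norm_num)
    simp only [n2p, n2p_alt, ht, ho]
    rw [if_neg (by omega), if_neg (by omega), if_neg (by omega), if_neg (by omega),
        if_neg (by omega), if_neg (by omega), if_neg (by omega),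
        if_neg (by omega), if_neg (by omega), if_neg (by omega)]

-- ===== VERDICT (by name: the statement is the Claim_ definition above) =====
theorem n2p_spec : Claim_equal_n2p := by
  intro number _
  unfold Spec_n2p
  exact n2p_eq_alt number
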